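-- pv_equiv track=rewrite | github.com/jjjake/internetarchive | internetarchive/utils.py | merge_dictionaries
-- ===== SOURCE A (Python) =====
-- from typing import Iterable
--
-- def merge_dictionaries(
--     dict0: dict | None,
--     dict1: dict | None,
--     keys_to_drop: Iterable | None = None,
-- ) -> dict:
--     """Merge two dictionaries.
--
--        Items in `dict0` can optionally be dropped before the merge.
--
--        If equal keys exist in both dictionaries,
--        entries in`dict0` are overwritten.
--
--        :param dict0: A base dictionary with the bulk of the items.
--
--        :param dict1: Additional items which overwrite the items in `dict0`.
--
--        :param keys_to_drop: An iterable of keys to drop from `dict0` before the merge.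
--
--        :returns: A merged dictionary.
--        """
--     if dict0 is not None:
--         new_dict = dict0.copy()
--     else:
--         new_dict = {}
--
--     if keys_to_drop is not None:
--         for key in keys_to_drop:
--             new_dict.pop(key, None)
--
--     # Items from `dict1` take precedence over items from `dict0`.
--     if dict1 is not None:
--         new_dict.update(dict1)
--
--     return new_dict
-- ===== SOURCE B (Python) =====
-- from typing import Iterable
--
--
-- def merge_dictionaries(
--     dict0: dict | None,
--     dict1: dict | None,
--     keys_to_drop: Iterable | None = None,
-- ) -> dict:
--     """Merge two dictionaries: drop `keys_to_drop` from `dict0`, `dict1` wins.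
--
--     Builds the result's item sequence directly in final order instead of
--     mutating a copy: first dict0's surviving keys (each already resolved to
--     its final value via a dict1 lookup), then dict1's genuinely new keys.
--     """
--     drop = frozenset(keys_to_drop) if keys_to_drop is not None else frozenset()
--     d0 = dict0 if dict0 is not None else {}
--     d1 = dict1 if dict1 is not None else {}
--     head = [(k, d1.get(k, v)) for k, v in d0.items() if k not in drop]
--     kept = {k for k, _ in head}
--     tail = [(k, v) for k, v in d1.items() if k not in kept]
--     return dict(head + tail)
-- ===== Notes on version B (the rewrite author's own statement) =====
-- stated objective: alternative
-- what changed: Instead of copying dict0, popping each drop key and mutating with update, B never mutates a dict: it constructs the result's item sequence directly in its final order as two list comprehensions - dict0's surviving items with each value already resolved through a dict1 lookup, then dict1's items whose keys are new - and builds the dict once from that sequence.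
import Mathlib
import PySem

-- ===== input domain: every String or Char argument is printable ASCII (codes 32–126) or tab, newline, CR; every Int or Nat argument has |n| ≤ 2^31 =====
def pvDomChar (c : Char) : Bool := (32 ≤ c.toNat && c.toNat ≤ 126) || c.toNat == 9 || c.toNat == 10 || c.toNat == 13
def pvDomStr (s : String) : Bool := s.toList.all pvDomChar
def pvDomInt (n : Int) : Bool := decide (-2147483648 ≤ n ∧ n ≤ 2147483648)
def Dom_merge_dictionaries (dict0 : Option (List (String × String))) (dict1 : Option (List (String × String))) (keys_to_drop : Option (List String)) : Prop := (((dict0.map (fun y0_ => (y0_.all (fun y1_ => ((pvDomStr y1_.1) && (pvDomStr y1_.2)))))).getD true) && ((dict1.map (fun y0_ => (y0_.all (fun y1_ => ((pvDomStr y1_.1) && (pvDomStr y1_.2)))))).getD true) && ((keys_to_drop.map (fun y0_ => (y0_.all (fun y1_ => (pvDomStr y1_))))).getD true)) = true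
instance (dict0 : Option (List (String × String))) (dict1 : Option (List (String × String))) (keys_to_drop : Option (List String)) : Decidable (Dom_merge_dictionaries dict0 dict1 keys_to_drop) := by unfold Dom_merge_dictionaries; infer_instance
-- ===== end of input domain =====

-- B builds the merged item sequence directly in final order (no dict mutation): an 'alternative' decomposition, same cost.


-- ===== PORT A =====
-- A: copy dict0 (or start empty), pop each key in keys_to_drop, then update with dict1.
def merge_dictionaries (dict0 : Option (List (String × String))) (dict1 : Option (List (String × String))) (keys_to_drop : Option (List String)) : List (String × String) :=
  let new_dict : PySem.Dict String String :=
    match dict0 with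
    | some d => PySem.Dict.ofList d
    | none => PySem.Dict.empty
  let new_dict : PySem.Dict String String :=
    match keys_to_drop with
    | some ks => ks.foldl (fun nd k => nd.erase k) new_dict   -- new_dict.pop(key, None)
    | none => new_dict
  let new_dict : PySem.Dict String String :=
    match dict1 with
    | some d => (PySem.Dict.ofList d).items.foldl (fun nd kv => nd.insert kv.1 kv.2) new_dict   -- new_dict.update(dict1)
    | none => new_dict
  new_dict.items

-- ===== PORT B =====
-- B: drop = frozenset(keys_to_drop) (or empty); head = dict0's surviving items with values
-- resolved through d1.get(k, v); tail = d1's items with keys not among head's; dict(head + tail).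
def merge_dictionaries_alt (dict0 : Option (List (String × String))) (dict1 : Option (List (String × String))) (keys_to_drop : Option (List String)) : List (String × String) :=
  let drop : PySem.Set String :=
    match keys_to_drop with
    | some ks => PySem.Set.ofList ks
    | none => PySem.Set.empty
  let d0 : PySem.Dict String String :=
    match dict0 with
    | some d => PySem.Dict.ofList d
    | none => PySem.Dict.empty
  let d1 : PySem.Dict String String :=
    match dict1 with
    | some d => PySem.Dict.ofList d
    | none => PySem.Dict.empty
  -- head = [(k, d1.get(k, v)) for k, v in d0.items() if k not in drop]
  let head : List (String × String) :=
    (d0.items.filter (fun kv => !(PySem.Set.contains drop kv.1))).map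
      (fun kv => (kv.1, d1.getD kv.1 kv.2))
  -- kept = {k for k, _ in head}
  let kept : PySem.Set String := PySem.Set.ofList (head.map Prod.fst)
  -- tail = [(k, v) for k, v in d1.items() if k not in kept]
  let tail : List (String × String) :=
    d1.items.filter (fun kv => !(PySem.Set.contains kept kv.1))
  -- dict(head + tail)
  (PySem.Dict.ofList (head ++ tail)).items

-- ===== PRECONDITION & SPEC =====
def Spec_merge_dictionaries (dict0 : Option (List (String × String))) (dict1 : Option (List (String × String))) (keys_to_drop : Option (List String)) (out : List (String × String)) : Prop := out = merge_dictionaries_alt dict0 dict1 keys_to_drop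
instance (dict0 : Option (List (String × String))) (dict1 : Option (List (String × String))) (keys_to_drop : Option (List String)) (out : List (String × String)) : Decidable (Spec_merge_dictionaries dict0 dict1 keys_to_drop out) := by unfold Spec_merge_dictionaries; infer_instance

-- ===== CLAIM (what is proved, stated in full; the proofs are below) =====
def Claim_equal_merge_dictionaries : Prop := ∀ (dict0 : Option (List (String × String))) (dict1 : Option (List (String × String))) (keys_to_drop : Option (List String)), Dom_merge_dictionaries dict0 dict1 keys_to_drop → Spec_merge_dictionaries dict0 dict1 keys_to_drop (merge_dictionaries dict0 dict1 keys_to_drop)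

-- ===== LEMMAS AND PROOFS =====

-- first-match lookup in an association list (the value d1.get(k, ·) resolves to)
def lk (l : List (String × String)) (k : String) : Option String :=
  (l.find? (fun p => p.1 == k)).map (·.2)

theorem lk_nil (k : String) : lk [] k = none := rfl

theorem lk_cons (p : String × String) (rest : List (String × String)) (k : String) :
    lk (p :: rest) k = if p.1 = k then some p.2 else lk rest k := by
  by_cases h : p.1 = k
  · simp [lk, List.find?, h]
  · have hb : (p.1 == k) = false := by simp [h]
    simp [lk, List.find?, hb, h]

theorem lk_eq_none_of_not_mem (l : List (String × String)) (k : String)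
    (h : k ∉ l.map Prod.fst) : lk l k = none := by
  induction l with
  | nil => rfl
  | cons p rest ih =>
      simp only [List.map_cons, List.mem_cons, not_or] at h
      rw [lk_cons, if_neg (fun he => h.1 he.symm), ih h.2]

-- A's pop-loop over `ks` is a filter of the items list.
theorem items_foldl_erase (ks : List String) (d : PySem.Dict String String) :
    (ks.foldl (fun nd k => nd.erase k) d).items
      = d.items.filter (fun kv => !(ks.contains kv.1)) := by
  induction ks generalizing d with
  | nil =>
      symm
      exact List.filter_eq_self.mpr (fun a _ => rfl)
  | cons k ks ih =>
      rw [List.foldl_cons, ih]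
      simp only [PySem.Dict.erase, List.filter_filter]
      apply List.filter_congr
      intro kv _
      cases h : kv.1 == k <;> cases h2 : decide (kv.1 = k) <;> simp_all

-- characterization of A's update loop: items of the result are d's items with every value
-- resolved through l (first match), followed by l's genuinely new items.
theorem items_foldl_insert (l : List (String × String)) (d : PySem.Dict String String)
    (hl : (l.map Prod.fst).Nodup) (hd : d.keys.Nodup) :
    (l.foldl (fun nd kv => nd.insert kv.1 kv.2) d).items
      = d.items.map (fun kv => (kv.1, (lk l kv.1).getD kv.2))
        ++ l.filter (fun kv => !(d.contains kv.1)) := by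
  induction l generalizing d with
  | nil => simp [lk_nil]
  | cons p rest ih =>
      obtain ⟨k0, v0⟩ := p
      simp only [List.map_cons, List.nodup_cons] at hl
      rw [List.foldl_cons]
      rw [ih (d.insert k0 v0) hl.2 (PySem.Dict.nodup_keys_insert d k0 v0 hd)]
      by_cases hc : d.contains k0 = true
      · rw [PySem.Dict.items_insert_of_contains d v0 hc]
        have hmap : (d.items.map (fun q => if q.1 == k0 then (k0, v0) else q)).map
            (fun kv => (kv.1, (lk rest kv.1).getD kv.2))
            = d.items.map (fun kv => (kv.1, (lk ((k0, v0) :: rest) kv.1).getD kv.2)) := by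
          rw [List.map_map]
          apply List.map_congr_left
          intro q _
          by_cases hq : q.1 = k0
          · simp only [Function.comp, hq, beq_self_eq_true, if_true]
            rw [lk_cons, lk_eq_none_of_not_mem rest k0 hl.1]
            simp
          · have : (q.1 == k0) = false := by simp [hq]
            simp only [Function.comp, this, Bool.false_eq_true, if_false]
            rw [lk_cons, if_neg (fun he => hq (Eq.symm he))]
        rw [hmap]
        congr 1
        · rw [List.filter_cons]
          simp only [hc, Bool.not_true]
          apply List.filter_congr
          intro kv hkv
          have hne : kv.1 ≠ k0 := by
            intro he
            exact hl.1 (he ▸ List.mem_map_of_mem hkv)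
          rw [PySem.Dict.contains_insert]
          simp [hne]
      · rw [PySem.Dict.items_insert_of_not_contains d v0 (by simpa using hc)]
        have hnk : ∀ q ∈ d.items, q.1 ≠ k0 := by
          intro q hq he
          exact hc (by
            rw [PySem.Dict.contains_iff_mem_keys]
            exact he ▸ List.mem_map_of_mem hq)
        rw [List.map_append]
        have hmap : d.items.map (fun kv => (kv.1, (lk rest kv.1).getD kv.2))
            = d.items.map (fun kv => (kv.1, (lk ((k0, v0) :: rest) kv.1).getD kv.2)) := by
          apply List.map_congr_left
          intro q hq
          rw [lk_cons, if_neg (fun he => hnk q hq (Eq.symm he))]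
        have hsingle : ([(k0, v0)] : List (String × String)).map
            (fun kv => (kv.1, (lk rest kv.1).getD kv.2)) = [(k0, v0)] := by
          simp [lk_eq_none_of_not_mem rest k0 hl.1]
        rw [hmap, hsingle]
        have hfilt : rest.filter (fun kv => !((d.insert k0 v0).contains kv.1))
            = rest.filter (fun kv => !(d.contains kv.1)) := by
          apply List.filter_congr
          intro kv hkv
          have hne : kv.1 ≠ k0 := by
            intro he
            exact hl.1 (he ▸ List.mem_map_of_mem hkv)
          rw [PySem.Dict.contains_insert]
          simp [hne]
        rw [hfilt, List.filter_cons]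
        simp [hc]

-- building a dict from an item list whose keys are distinct reproduces that list
theorem ofList_items_of_nodup (l : List (String × String)) (hnd : (l.map Prod.fst).Nodup) :
    (PySem.Dict.ofList l).items = l := by
  have h := PySem.Dict.items_foldl_insert_fresh l Prod.fst Prod.snd PySem.Dict.empty
    (fun a _ => by simp [PySem.Dict.contains, PySem.Dict.empty]) hnd
  simpa [PySem.Dict.ofList] using h

-- lk on a nodup-key list returns the value of the (unique) pair with key k
theorem lk_of_mem_nodup (l : List (String × String)) (k w : String)
    (hnd : (l.map Prod.fst).Nodup) (hm : (k, w) ∈ l) : lk l k = some w := by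
  induction l with
  | nil => cases hm
  | cons p rest ih =>
      simp only [List.map_cons, List.nodup_cons] at hnd
      rw [lk_cons]
      rcases List.mem_cons.mp hm with he | hm'
      · rw [if_pos (by rw [← he]), ← he]
      · have hne : p.1 ≠ k := by
          intro he
          exact hnd.1 (he ▸ List.mem_map_of_mem hm')
        rw [if_neg hne]
        exact ih hnd.2 hm'

-- Dict.getD is the first-match lookup lk (on a nodup-key dict)
theorem getD_eq_lk (d : PySem.Dict String String) (hnd : d.keys.Nodup) (k : String) (v : String) :
    d.getD k v = (lk d.items k).getD v := by
  cases hg : d.get? k with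
  | none =>
      rw [PySem.Dict.getD_of_get?_eq_none d v hg]
      rw [lk_eq_none_of_not_mem d.items k
        (by rw [← PySem.Dict.keys]; exact (PySem.Dict.get?_eq_none_iff_not_mem_keys d k).mp hg)]
      rfl
  | some w =>
      rw [PySem.Dict.getD_of_get?_eq_some d v hg]
      have hm : (k, w) ∈ d.items := PySem.Dict.mem_items_of_get?_eq_some d hg
      rw [lk_of_mem_nodup d.items k w (by rw [← PySem.Dict.keys]; exact hnd) hm]
      rfl

theorem nodup_fst_filter (d : PySem.Dict String String) (hnd : d.keys.Nodup)
    (p : String × String → Bool) :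
    ((d.items.filter p).map Prod.fst).Nodup :=
  (List.Sublist.map Prod.fst (List.filter_sublist (l := d.items))).nodup hnd

-- main lemma: A's result items equal B's head ++ tail, for arbitrary source dicts with
-- distinct keys and an arbitrary drop list.
theorem merge_core (dE d1 : PySem.Dict String String)
    (hE : dE.keys.Nodup) (h1 : d1.keys.Nodup) :
    (d1.items.foldl (fun nd kv => nd.insert kv.1 kv.2) dE).items
      = dE.items.map (fun kv => (kv.1, d1.getD kv.1 kv.2))
        ++ d1.items.filter (fun kv =>
            !(PySem.Set.contains (PySem.Set.ofList (dE.items.map Prod.fst)) kv.1)) := by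
  rw [items_foldl_insert d1.items dE (by rw [← PySem.Dict.keys]; exact h1) hE]
  have hmap : dE.items.map (fun kv => (kv.1, (lk d1.items kv.1).getD kv.2))
      = dE.items.map (fun kv => (kv.1, d1.getD kv.1 kv.2)) := by
    apply List.map_congr_left
    intro kv _
    rw [getD_eq_lk d1 h1]
  rw [hmap]
  congr 1
  · apply List.filter_congr
    intro kv _
    have : PySem.Set.contains (PySem.Set.ofList (dE.items.map Prod.fst)) kv.1
        = dE.contains kv.1 := by
      rcases hb : dE.contains kv.1 with _ | _
      · have : kv.1 ∉ dE.keys := by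
          intro hm
          rw [← Bool.not_eq_true] at hb
          exact hb ((PySem.Dict.contains_iff_mem_keys dE kv.1).mpr hm)
        simp only [PySem.Dict.keys] at this
        simp [PySem.Set.mem_ofList, this]
      · have : kv.1 ∈ dE.keys := (PySem.Dict.contains_iff_mem_keys dE kv.1).mp hb
        simp only [PySem.Dict.keys] at this
        simp [PySem.Set.mem_ofList, this]
    rw [this]

-- a Bool bridge: membership in set(ks) is list membership
theorem contains_ofList_eq (ks : List String) (x : String) :
    PySem.Set.contains (PySem.Set.ofList ks) x = ks.contains x := by
  cases h : ks.contains x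
  · have hx : x ∉ ks := by simpa using h
    simp [PySem.Set.contains, PySem.Set.mem_ofList, hx]
  · have hx : x ∈ ks := by simpa using h
    simp [PySem.Set.contains, PySem.Set.mem_ofList, hx]

theorem contains_iff_mem (s : PySem.Set String) (x : String) :
    PySem.Set.contains s x = true ↔ x ∈ s := by
  simp [PySem.Set.contains]

-- master lemma: A's copy/pop/update pipeline and B's head ++ tail item list agree,
-- for any source dicts with distinct keys and any drop predicate realised both as a
-- list (A iterates it) and as a set (B tests membership in it).
theorem master (d0d d1d : PySem.Dict String String) (h0 : d0d.keys.Nodup)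
    (h1 : d1d.keys.Nodup) (ks : List String) (dropS : PySem.Set String)
    (hdrop : ∀ x, PySem.Set.contains dropS x = ks.contains x) :
    (d1d.items.foldl (fun nd kv => nd.insert kv.1 kv.2)
        (ks.foldl (fun nd k => nd.erase k) d0d)).items
      = (PySem.Dict.ofList
          ((d0d.items.filter (fun kv => !(PySem.Set.contains dropS kv.1))).map
              (fun kv => (kv.1, d1d.getD kv.1 kv.2))
            ++ d1d.items.filter (fun kv => !(PySem.Set.contains
                (PySem.Set.ofList
                  (((d0d.items.filter (fun kv => !(PySem.Set.contains dropS kv.1))).map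
                    (fun kv => (kv.1, d1d.getD kv.1 kv.2))).map Prod.fst)) kv.1)))).items := by
  have hfl : (ks.foldl (fun nd k => nd.erase k) d0d).items
      = d0d.items.filter (fun kv => !(PySem.Set.contains dropS kv.1)) := by
    rw [items_foldl_erase]
    apply List.filter_congr
    intro kv _
    rw [hdrop]
  have hflk : ((d0d.items.filter (fun kv => !(PySem.Set.contains dropS kv.1))).map
        (fun kv => (kv.1, d1d.getD kv.1 kv.2))).map Prod.fst
      = (d0d.items.filter (fun kv => !(PySem.Set.contains dropS kv.1))).map Prod.fst := by
    rw [List.map_map]; rfl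
  have hflnd : ((d0d.items.filter (fun kv => !(PySem.Set.contains dropS kv.1))).map
      Prod.fst).Nodup := nodup_fst_filter d0d h0 _
  have hE : (ks.foldl (fun nd k => nd.erase k) d0d).keys.Nodup := by
    show ((ks.foldl (fun nd k => nd.erase k) d0d).items.map Prod.fst).Nodup
    rw [hfl]; exact hflnd
  have hnd : ((((d0d.items.filter (fun kv => !(PySem.Set.contains dropS kv.1))).map
        (fun kv => (kv.1, d1d.getD kv.1 kv.2)))
      ++ d1d.items.filter (fun kv => !(PySem.Set.contains
          (PySem.Set.ofList
            (((d0d.items.filter (fun kv => !(PySem.Set.contains dropS kv.1))).map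
              (fun kv => (kv.1, d1d.getD kv.1 kv.2))).map Prod.fst)) kv.1))).map
      Prod.fst).Nodup := by
    rw [List.map_append, List.nodup_append]
    refine ⟨by rw [hflk]; exact hflnd, nodup_fst_filter d1d h1 _, ?_⟩
    intro a ha b hb hab
    subst hab
    rcases List.mem_map.mp hb with ⟨kv, hkv, hkv1⟩
    have hmem := (List.mem_filter.mp hkv).2
    rw [hkv1] at hmem
    rw [Bool.not_eq_eq_eq_not, Bool.not_true, ← Bool.not_eq_true] at hmem
    exact hmem ((contains_iff_mem _ _).mpr ((PySem.Set.mem_ofList _ _).mpr ha))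
  rw [ofList_items_of_nodup _ hnd]
  rw [merge_core (ks.foldl (fun nd k => nd.erase k) d0d) d1d hE h1, hfl, hflk]

-- ===== VERDICT (by name: the statement is the Claim_ definition above) =====
theorem merge_dictionaries_spec : Claim_equal_merge_dictionaries := by
  intro dict0 dict1 keys_to_drop _
  unfold Spec_merge_dictionaries merge_dictionaries merge_dictionaries_alt
  have hempty : (PySem.Dict.empty : PySem.Dict String String).keys.Nodup :=
    PySem.Dict.nodup_keys_empty
  cases dict0 with
  | none =>
      cases dict1 with
      | none =>
          cases keys_to_drop with
          | none => exact master PySem.Dict.empty PySem.Dict.empty hempty hempty [] PySem.Set.empty (fun x => rfl)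
          | some ks => exact master PySem.Dict.empty PySem.Dict.empty hempty hempty ks (PySem.Set.ofList ks) (contains_ofList_eq ks)
      | some d1 =>
          cases keys_to_drop with
          | none => exact master PySem.Dict.empty (PySem.Dict.ofList d1) hempty (PySem.Dict.nodup_keys_ofList d1) [] PySem.Set.empty (fun x => rfl)
          | some ks => exact master PySem.Dict.empty (PySem.Dict.ofList d1) hempty (PySem.Dict.nodup_keys_ofList d1) ks (PySem.Set.ofList ks) (contains_ofList_eq ks)
  | some d0 =>
      cases dict1 with
      | none =>
          cases keys_to_drop with
          | none => exact master (PySem.Dict.ofList d0) PySem.Dict.empty (PySem.Dict.nodup_keys_ofList d0) hempty [] PySem.Set.empty (fun x => rfl)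
          | some ks => exact master (PySem.Dict.ofList d0) PySem.Dict.empty (PySem.Dict.nodup_keys_ofList d0) hempty ks (PySem.Set.ofList ks) (contains_ofList_eq ks)
      | some d1 =>
          cases keys_to_drop with
          | none => exact master (PySem.Dict.ofList d0) (PySem.Dict.ofList d1) (PySem.Dict.nodup_keys_ofList d0) (PySem.Dict.nodup_keys_ofList d1) [] PySem.Set.empty (fun x => rfl)
          | some ks => exact master (PySem.Dict.ofList d0) (PySem.Dict.ofList d1) (PySem.Dict.nodup_keys_ofList d0) (PySem.Dict.nodup_keys_ofList d1) ks (PySem.Set.ofList ks) (contains_ofList_eq ks)
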